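-- pv_equiv track=rewrite | github.com/Songminseon/algorithm-python | 정렬/1427.py | solution
-- ===== SOURCE A (Python) =====
-- def solution(num):
--     num_list = []
--     answer = ""
--     for i in str(num):
--         num_list.append(int(i))
--
--     num_list.sort(reverse=True)
--
--     for i in num_list:
--         answer += str(i)
--
--     return answer
-- ===== SOURCE B (Python) =====
-- def solution(num):
--     count = [0] * 10
--     for c in str(num):
--         count[int(c)] += 1
--     answer = ""
--     for d in range(9, -1, -1):
--         answer += str(d) * count[d]
--     return answer
-- ===== Notes on version B (the rewrite author's own statement) =====
-- stated objective: alternative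
-- what changed: Replaces the comparison sort of the digit list with a counting sort: a 10-slot frequency table filled in one pass over str(num), then the answer emitted digit 9 down to 0; no .sort call.
import Mathlib
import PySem

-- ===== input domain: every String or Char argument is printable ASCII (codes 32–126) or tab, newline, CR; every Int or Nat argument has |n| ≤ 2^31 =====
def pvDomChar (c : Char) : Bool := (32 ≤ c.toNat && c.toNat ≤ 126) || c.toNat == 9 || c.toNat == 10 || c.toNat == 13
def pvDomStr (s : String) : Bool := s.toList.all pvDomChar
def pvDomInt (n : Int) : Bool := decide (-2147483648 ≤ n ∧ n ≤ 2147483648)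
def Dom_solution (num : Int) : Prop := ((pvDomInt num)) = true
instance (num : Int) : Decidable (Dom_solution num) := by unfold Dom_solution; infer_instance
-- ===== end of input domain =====

-- B replaces A's comparison sort of the digit list by a counting sort (10-slot frequency table, emitted 9 down to 0); same return value.


-- ===== PORT A =====
def solution (num : Int) : String :=
  let num_list : List Int :=
    (PySem.Int.toStr num).toList.foldl
      (fun acc i => acc ++ [(PySem.Int.ofStr? (String.ofList [i])).getD 0]) []
  let num_list := PySem.List.sorted num_list (fun x => x) true
  num_list.foldl (fun answer i => answer ++ PySem.Int.toStr i) ""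

-- ===== PORT B =====
def solution_alt (num : Int) : String :=
  let count : List Int :=
    (PySem.Int.toStr num).toList.foldl
      (fun cnt c =>
        let d := (PySem.Int.ofStr? (String.ofList [c])).getD 0
        cnt.set d.toNat (cnt.getD d.toNat 0 + 1))
      (List.replicate 10 0)
  -- str(d) * count[d] is ported as joining count[d] copies of str(d)
  (PySem.List.pyRange 9 (-1) (-1)).foldl
    (fun answer d =>
      answer ++ PySem.Str.join "" (List.replicate (count.getD d.toNat 0).toNat (PySem.Int.toStr d)))
    ""

-- ===== PRECONDITION & SPEC =====
-- Pre_ excludes exactly negative num, on which both A and B raise ValueError (int('-') on the sign character).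
def Pre_solution (num : Int) : Prop := 0 ≤ num
instance (num : Int) : Decidable (Pre_solution num) := by unfold Pre_solution; infer_instance
def pvWitness_solution : Int := (2143)

def Spec_solution (num : Int) (out : String) : Prop := out = solution_alt num
instance (num : Int) (out : String) : Decidable (Spec_solution num out) := by unfold Spec_solution; infer_instance

-- ===== CLAIM (what is proved, stated in full; the proofs are below) =====
def Claim_equal_solution : Prop := ∀ (num : Int), Dom_solution num → Pre_solution num → Spec_solution num (solution num)

-- ===== LEMMAS AND PROOFS =====

-- the value int(c) that both ports compute for a character c
def pvDv (c : Char) : Int := (PySem.Int.ofStr? (String.ofList [c])).getD 0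

-- frequency table of a digit list: slot i holds the count of digit i
def pvCounts (L : List Int) : List Int := (List.range 10).map (fun (i : Nat) => (L.count (i : Int) : Int))

-- the digits of L laid out 9-blocks first down to 0-blocks
def pvBlocks (L : List Int) : List Int :=
  ([9,8,7,6,5,4,3,2,1,0] : List Int).flatMap (fun d => List.replicate (L.count d) d)

lemma pvToDigitsCore_mem (fuel : Nat) : ∀ (n : Nat) (ds : List Char),
    ∀ c ∈ Nat.toDigitsCore 10 fuel n ds, c ∈ ds ∨ ∃ k, k < 10 ∧ c = Nat.digitChar k := by
  induction fuel with
  | zero => intro n ds c hc; simp [Nat.toDigitsCore] at hc; exact Or.inl hc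
  | succ f ih =>
    intro n ds c hc
    simp only [Nat.toDigitsCore] at hc
    split at hc
    · rcases List.mem_cons.1 hc with rfl | h
      · exact Or.inr ⟨n % 10, Nat.mod_lt _ (by omega), rfl⟩
      · exact Or.inl h
    · rcases ih _ _ c hc with h | h
      · rcases List.mem_cons.1 h with rfl | h
        · exact Or.inr ⟨n % 10, Nat.mod_lt _ (by omega), rfl⟩
        · exact Or.inl h
      · exact Or.inr h

lemma pvDv_digitChar (k : Nat) (hk : k < 10) : 0 ≤ pvDv (Nat.digitChar k) ∧ pvDv (Nat.digitChar k) < 10 := by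
  interval_cases k <;> decide

lemma pvDigits (num : Int) (h : 0 ≤ num) :
    ∀ c ∈ (PySem.Int.toStr num).toList, 0 ≤ pvDv c ∧ pvDv c < 10 := by
  intro c hc
  rw [PySem.Int.toList_toStr] at hc
  unfold PySem.Int.toChars at hc
  rw [if_neg (by omega)] at hc
  rcases pvToDigitsCore_mem _ _ _ c hc with h1 | ⟨k, hk, rfl⟩
  · simp at h1
  · exact pvDv_digitChar k hk

lemma pvCounts_length (L : List Int) : (pvCounts L).length = 10 := by
  simp [pvCounts]

lemma pvCounts_getElem (L : List Int) (i : Nat) (h : i < (pvCounts L).length) :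
    (pvCounts L)[i] = (L.count (i : Int) : Int) := by
  have h' : i < 10 := by simpa [pvCounts] using h
  simp only [pvCounts]
  rw [List.getElem_map, List.getElem_range]

lemma pvCounts_getD (L : List Int) (d : Int) (hd : 0 ≤ d ∧ d < 10) :
    (pvCounts L).getD d.toNat 0 = (L.count d : Int) := by
  have h10 : d.toNat < (pvCounts L).length := by rw [pvCounts_length]; omega
  rw [List.getD_eq_getElem _ _ h10, pvCounts_getElem]
  congr
  omega

lemma pvCounts_snoc (L : List Int) (d : Int) (hd : 0 ≤ d ∧ d < 10) :
    pvCounts (L ++ [d]) = (pvCounts L).set d.toNat ((pvCounts L).getD d.toNat 0 + 1) := by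
  apply List.ext_getElem
  · simp [pvCounts_length]
  · intro i h1 h2
    have hi : i < 10 := by rw [pvCounts_length] at h1; exact h1
    rw [List.getElem_set, pvCounts_getElem]
    by_cases hid : d.toNat = i
    · rw [if_pos hid, pvCounts_getD L d hd]
      have he : (i : Int) = d := by omega
      rw [he, List.count_append, List.count_singleton]
      simp
    · rw [if_neg hid, pvCounts_getElem]
      have he : ((i : Int) ≠ d) := by omega
      rw [List.count_append, List.count_singleton]
      simp
      omega

lemma pvFoldCounts (cs : List Char) (h : ∀ c ∈ cs, 0 ≤ pvDv c ∧ pvDv c < 10) :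
    cs.foldl
      (fun cnt c =>
        let d := (PySem.Int.ofStr? (String.ofList [c])).getD 0
        cnt.set d.toNat (cnt.getD d.toNat 0 + 1))
      (List.replicate 10 0)
    = pvCounts (cs.map pvDv) := by
  induction cs using List.reverseRecOn with
  | nil => simp [pvCounts]
  | append_singleton cs c ih =>
    rw [List.foldl_append]
    have hc := h c (by simp)
    have hcs : ∀ x ∈ cs, 0 ≤ pvDv x ∧ pvDv x < 10 := fun x hx => h x (by simp [hx])
    rw [ih hcs]
    simp only [List.foldl_cons, List.foldl_nil, List.map_append, List.map_cons, List.map_nil]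
    rw [pvCounts_snoc _ _ hc]
    rfl

lemma pvCount_blocks (L : List Int) (hL : ∀ x ∈ L, 0 ≤ x ∧ x < 10) (a : Int) :
    (pvBlocks L).count a = L.count a := by
  by_cases ha : 0 ≤ a ∧ a < 10
  · simp [pvBlocks, List.count_append, List.count_replicate]
    rcases ha with ⟨h0, h1⟩
    interval_cases a <;> simp
  · have h0 : L.count a = 0 := List.count_eq_zero.2 (fun hm => ha (hL a hm))
    rw [h0]
    simp [pvBlocks, List.count_append, List.count_replicate]
    refine ⟨?_, ?_, ?_, ?_, ?_, ?_, ?_, ?_, ?_, ?_⟩ <;>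
      (intro he; subst he; exact (ha (by norm_num)).elim)

lemma pvPairwise_blocks (ds : List Int) (hd : ds.Pairwise (fun a b => b ≤ a)) (f : Int → Nat) :
    (ds.flatMap fun d => List.replicate (f d) d).Pairwise (fun a b => b ≤ a) := by
  induction ds with
  | nil => simp
  | cons d ds ih =>
    simp only [List.flatMap_cons]
    rw [List.pairwise_append]
    refine ⟨List.pairwise_replicate.2 (by simp), ih hd.of_cons, ?_⟩
    intro x hx y hy
    rw [List.eq_of_mem_replicate hx]
    rcases List.mem_flatMap.1 hy with ⟨d', hd', hy'⟩
    rw [List.eq_of_mem_replicate hy']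
    exact (List.pairwise_cons.1 hd).1 d' hd'

lemma pvSorted_eq_blocks (L : List Int) (hL : ∀ x ∈ L, 0 ≤ x ∧ x < 10) :
    PySem.List.sorted L (fun x => x) true = pvBlocks L := by
  have hperm : (PySem.List.sorted L (fun x => x) true).Perm (pvBlocks L) := by
    refine (PySem.List.sorted_perm L _ true).trans (List.perm_iff_count.2 fun a => ?_)
    exact (pvCount_blocks L hL a).symm
  have h1 : (PySem.List.sorted L (fun x => x) true).Pairwise (fun a b => b ≤ a) :=
    PySem.List.sorted_pairwise_rev L _
  have h2 : (pvBlocks L).Pairwise (fun a b => b ≤ a) :=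
    pvPairwise_blocks _ (by decide) _
  exact List.Perm.eq_of_pairwise (fun a b _ _ hab hba => le_antisymm hba hab) h1 h2 hperm

lemma pvJoinNil (parts : List (List Char)) : PySem.Chars.join [] parts = parts.flatten := by
  simp only [PySem.Chars.join, List.intercalate]
  induction parts with
  | nil => simp
  | cons p ps ih =>
    cases ps with
    | nil => simp
    | cons q qs => simp_all [List.intersperse]

lemma pvFoldStr (g : Int → String) (xs : List Int) (s : String) :
    (xs.foldl (fun a i => a ++ g i) s).toList
      = s.toList ++ xs.flatMap (fun i => (g i).toList) := by
  induction xs generalizing s with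
  | nil => simp
  | cons x xs ih => simp [ih, String.toList_append]

lemma pvRepFlat (n : Nat) (d : Int) (g : Int → List Char) :
    (List.replicate n d).flatMap g = (List.replicate n (g d)).flatten := by
  induction n with
  | zero => simp
  | succ n ih => simp [List.replicate_succ, ih]

-- ===== VERDICT (by name: the statement is the Claim_ definition above) =====
theorem solution_spec : Claim_equal_solution := by
  intro num _ hpre
  unfold Spec_solution
  have hdig := pvDigits num hpre
  rw [← String.toList_inj]
  unfold solution solution_alt
  dsimp only
  rw [PySem.List.foldl_append_singleton_eq_map, pvFoldCounts _ hdig,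
      pvSorted_eq_blocks _ (by intro x hx; rcases List.mem_map.1 hx with ⟨c, hc, rfl⟩; exact hdig c hc),
      show PySem.List.pyRange 9 (-1) (-1) = [9,8,7,6,5,4,3,2,1,0] from by decide,
      List.nil_append]
  rw [pvFoldStr (fun i => PySem.Int.toStr i),
      pvFoldStr (fun d => PySem.Str.join "" (List.replicate ((pvCounts ((PySem.Int.toStr num).toList.map pvDv)).getD d.toNat 0).toNat (PySem.Int.toStr d)))]
  rw [show (fun i => (PySem.Int.ofStr? (String.ofList [i])).getD 0) = pvDv from rfl]
  set L := (PySem.Int.toStr num).toList.map pvDv with hLdef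
  have h9 := pvCounts_getD L 9 (by norm_num)
  have h8 := pvCounts_getD L 8 (by norm_num)
  have h7 := pvCounts_getD L 7 (by norm_num)
  have h6 := pvCounts_getD L 6 (by norm_num)
  have h5 := pvCounts_getD L 5 (by norm_num)
  have h4 := pvCounts_getD L 4 (by norm_num)
  have h3 := pvCounts_getD L 3 (by norm_num)
  have h2 := pvCounts_getD L 2 (by norm_num)
  have h1 := pvCounts_getD L 1 (by norm_num)
  have h0 := pvCounts_getD L 0 (by norm_num)
  simp only [pvBlocks, List.flatMap_cons, List.flatMap_nil, List.flatMap_append, pvRepFlat,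
    PySem.Str.toList_join, List.map_replicate, h9, h8, h7, h6, h5, h4, h3, h2, h1, h0,
    Int.toNat_natCast, List.append_nil, List.nil_append, String.toList_empty, pvJoinNil]
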